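-- pv_equiv track=rewrite | github.com/andrewmlefebvre/ConvexHull | convexhull.py | maxMinYPoints
-- ===== SOURCE A (Python) =====
-- def maxMinYPoints(left, right):
-- 	max = left[0][1]
-- 	min = left[0][1]
--
-- 	for i in range(1, len(left)):
-- 		if(left[i][1] > max):
-- 			max = left[i][1]
-- 		if(left[i][1] < min):
-- 			min = left[i][1]
-- 	for i in range(1, len(right)):
-- 		if(right[i][1] > max):
-- 			max = right[i][1]
-- 		if(right[i][1] < min):
-- 			min = right[i][1]
-- 	return max, min
-- ===== SOURCE B (Python) =====
-- def maxMinYPoints(left, right):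
--     ys = sorted([left[0][1]] + [p[1] for p in left[1:]] + [p[1] for p in right[1:]])
--     return ys[-1], ys[0]
-- ===== Notes on version B (the rewrite author's own statement) =====
-- stated objective: alternative
-- what changed: Instead of a linear scan with running max/min accumulators, B sorts the list of candidate y-values (left[0][1] plus the tails of both lists, skipping right[0] as A does) and returns its last and first elements.
import Mathlib
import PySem

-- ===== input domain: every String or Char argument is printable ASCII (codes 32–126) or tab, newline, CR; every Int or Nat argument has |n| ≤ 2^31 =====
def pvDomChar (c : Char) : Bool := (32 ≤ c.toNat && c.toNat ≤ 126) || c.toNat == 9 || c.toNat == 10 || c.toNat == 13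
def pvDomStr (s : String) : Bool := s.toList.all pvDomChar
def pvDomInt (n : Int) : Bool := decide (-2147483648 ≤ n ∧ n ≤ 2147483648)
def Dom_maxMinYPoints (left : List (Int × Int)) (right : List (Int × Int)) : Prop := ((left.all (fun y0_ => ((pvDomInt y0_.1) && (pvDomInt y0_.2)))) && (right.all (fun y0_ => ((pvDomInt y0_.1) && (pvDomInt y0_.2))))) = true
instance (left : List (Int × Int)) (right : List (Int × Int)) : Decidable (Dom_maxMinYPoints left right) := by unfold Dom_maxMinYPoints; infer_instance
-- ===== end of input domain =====

-- ===== PORT A =====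
-- B changes only how the result is computed; neither program mutates its arguments.
def maxMinYPoints (left : List (Int × Int)) (right : List (Int × Int)) : Int × Int :=
  -- max = left[0][1]; min = left[0][1]  (left[0] raises IndexError on empty left: excluded by Pre_)
  let y0 := ((PySem.List.pyGet? left 0).getD (0, 0)).2
  -- for i in range(1, len(left)): if left[i][1] > max: … ; if left[i][1] < min: …
  let s1 := (PySem.List.pyRange 1 (PySem.List.len left) 1).foldl
    (fun (mm : Int × Int) i =>
      (if (PySem.List.pyGetD left i (0, 0)).2 > mm.1 then (PySem.List.pyGetD left i (0, 0)).2 else mm.1,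
       if (PySem.List.pyGetD left i (0, 0)).2 < mm.2 then (PySem.List.pyGetD left i (0, 0)).2 else mm.2))
    (y0, y0)
  -- for i in range(1, len(right)): same updates
  let s2 := (PySem.List.pyRange 1 (PySem.List.len right) 1).foldl
    (fun (mm : Int × Int) i =>
      (if (PySem.List.pyGetD right i (0, 0)).2 > mm.1 then (PySem.List.pyGetD right i (0, 0)).2 else mm.1,
       if (PySem.List.pyGetD right i (0, 0)).2 < mm.2 then (PySem.List.pyGetD right i (0, 0)).2 else mm.2))
    s1
  s2

-- ===== PORT B =====
def maxMinYPoints_alt (left : List (Int × Int)) (right : List (Int × Int)) : Int × Int :=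
  -- ys = sorted([left[0][1]] + [p[1] for p in left[1:]] + [p[1] for p in right[1:]])
  let ys := PySem.List.sorted
      ([((PySem.List.pyGet? left 0).getD (0, 0)).2]
        ++ (PySem.List.slice left (some 1) none).map (fun p => p.2)
        ++ (PySem.List.slice right (some 1) none).map (fun p => p.2))
      (fun y => y) false
  -- return ys[-1], ys[0]
  ((PySem.List.pyGet? ys (-1)).getD 0, (PySem.List.pyGet? ys 0).getD 0)

-- ===== PRECONDITION & SPEC =====
-- Pre_ excludes only empty left, on which the Python A raises IndexError at left[0].
def Pre_maxMinYPoints (left : List (Int × Int)) (right : List (Int × Int)) : Prop := left ≠ []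
instance (left : List (Int × Int)) (right : List (Int × Int)) : Decidable (Pre_maxMinYPoints left right) := by unfold Pre_maxMinYPoints; infer_instance
def pvWitness_maxMinYPoints : (List (Int × Int)) × (List (Int × Int)) := ([(0, 1)], [(2, 3)])
def Spec_maxMinYPoints (left : List (Int × Int)) (right : List (Int × Int)) (out : Int × Int) : Prop := out = maxMinYPoints_alt left right
instance (left : List (Int × Int)) (right : List (Int × Int)) (out : Int × Int) : Decidable (Spec_maxMinYPoints left right out) := by unfold Spec_maxMinYPoints; infer_instance

-- ===== CLAIM (what is proved, stated in full; the proofs are below) =====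
def Claim_equal_maxMinYPoints : Prop := ∀ (left : List (Int × Int)) (right : List (Int × Int)), Dom_maxMinYPoints left right → Pre_maxMinYPoints left right → Spec_maxMinYPoints left right (maxMinYPoints left right)

-- ===== LEMMAS AND PROOFS =====

-- A's pairwise fold splits into two independent scalar folds (running max / running min).
theorem pairFold_split (ys : List Int) (a b : Int) :
    ys.foldl (fun (mm : Int × Int) y =>
        (if y > mm.1 then y else mm.1, if y < mm.2 then y else mm.2)) (a, b)
      = (ys.foldl (fun m y => if m < y then y else m) a,
         ys.foldl (fun m y => if y < m then y else m) b) := by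
  induction ys generalizing a b with
  | nil => rfl
  | cons y ys ih => simp [List.foldl_cons, gt_iff_lt, ih]

-- A's running-max fold is Python's max over the nonempty candidate list.
theorem max?_cons_foldl (a : Int) (l : List Int) :
    PySem.List.max? (a :: l) (fun y => y) = some (l.foldl (fun m y => if m < y then y else m) a) := by
  show List.foldl _ (some a) l = _
  induction l generalizing a with
  | nil => rfl
  | cons y l ih => by_cases h : a < y <;> simp [List.foldl_cons, h, ih]

theorem min?_cons_foldl (a : Int) (l : List Int) :
    PySem.List.min? (a :: l) (fun y => y) = some (l.foldl (fun m y => if y < m then y else m) a) := by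
  show List.foldl _ (some a) l = _
  induction l generalizing a with
  | nil => rfl
  | cons y l ih => by_cases h : y < a <;> simp [List.foldl_cons, h, ih]

-- In a ≤-sorted list every element is bounded by the last one.
theorem pairwise_le_getLast (l : List Int) (h : l ≠ []) (hp : l.Pairwise (· ≤ ·)) :
    ∀ x ∈ l, x ≤ l.getLast h := by
  induction l with
  | nil => exact absurd rfl h
  | cons a t ih =>
    rcases List.pairwise_cons.mp hp with ⟨ha, ht⟩
    intro x hx
    match t, hx with
    | [], hx => simp at hx; simp [hx]
    | b :: t', hx =>
      rw [List.getLast_cons (by simp)]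
      rcases List.mem_cons.mp hx with rfl | hx'
      · exact le_trans (ha b (by simp)) (ih (by simp) ht b (by simp))
      · exact ih (by simp) ht x hx'

-- Head of the sorted candidate list is Python's min; last is Python's max.
theorem sorted_head_getLast (ys : List Int) (h : ys ≠ []) :
    (PySem.List.sorted ys (fun y => y) false).head? = PySem.List.min? ys (fun y => y) ∧
    (PySem.List.sorted ys (fun y => y) false).getLast? = PySem.List.max? ys (fun y => y) := by
  set s := PySem.List.sorted ys (fun y => y) false with hs
  have hsne : s ≠ [] := by
    rw [hs, Ne, PySem.List.sorted_eq_nil_iff]; exact h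
  have hperm : s.Perm ys := PySem.List.sorted_perm ys _ false
  have hpw : s.Pairwise (· ≤ ·) := by
    simpa using PySem.List.sorted_pairwise ys (fun y => y)
  match hsmk : s, hsne with
  | m :: t, _ =>
    constructor
    · -- head = min
      have hne : PySem.List.min? ys (fun y => y) ≠ none := fun hn =>
        h ((PySem.List.min?_eq_none_iff ys (fun y => y)).mp hn)
      obtain ⟨mn, hmn⟩ := Option.ne_none_iff_exists'.mp hne
      rw [hmn]
      have hmnmem : mn ∈ ys := PySem.List.min?_mem hmn
      have hmle : ∀ y ∈ ys, m ≤ y := by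
        intro y hy
        simpa using PySem.List.key_head_sorted_le ys (fun y => y) hs.symm y hy
      have hmmem : m ∈ ys := hperm.mem_iff.mp (by simp)
      have h1 : m ≤ mn := hmle mn hmnmem
      have h2 : mn ≤ m := by simpa using PySem.List.min?_isMin hmn m hmmem
      simp [le_antisymm h1 h2]
    · -- last = max
      have hne : PySem.List.max? ys (fun y => y) ≠ none := fun hn =>
        h ((PySem.List.max?_eq_none_iff ys (fun y => y)).mp hn)
      obtain ⟨mx, hmx⟩ := Option.ne_none_iff_exists'.mp hne
      rw [hmx]
      have hmxmem : mx ∈ ys := PySem.List.max?_mem hmx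
      have hlastmem : (m :: t).getLast (by simp) ∈ ys :=
        hperm.mem_iff.mp (List.getLast_mem _)
      have h1 : (m :: t).getLast (by simp) ≤ mx := by
        simpa using PySem.List.max?_isMax hmx _ hlastmem
      have h2 : mx ≤ (m :: t).getLast (by simp) :=
        pairwise_le_getLast (m :: t) (by simp) hpw mx (hperm.mem_iff.mpr hmxmem)
      rw [List.getLast?_eq_some_getLast (by simp), le_antisymm h1 h2]

-- ===== VERDICT (by name: the statement is the Claim_ definition above) =====
theorem maxMinYPoints_spec : Claim_equal_maxMinYPoints := by
  intro left right _ hpre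
  match left with
  | [] => exact absurd rfl hpre
  | p :: ls =>
    unfold Spec_maxMinYPoints maxMinYPoints maxMinYPoints_alt
    simp only [PySem.List.slice_from_one]
    rw [show ((PySem.List.pyGet? (p :: ls) 0).getD (0, 0)).2 = p.2 by
          simp [PySem.List.pyGet?, PySem.List.pyIdx?]]
    rw [PySem.List.foldl_pyRange_pyGetD (p :: ls) ((0, 0) : Int × Int)
          (fun (mm : Int × Int) (x : Int × Int) =>
            (if x.2 > mm.1 then x.2 else mm.1, if x.2 < mm.2 then x.2 else mm.2))
          (p.2, p.2) (by norm_num)]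
    rw [PySem.List.foldl_pyRange_pyGetD right ((0, 0) : Int × Int)
          (fun (mm : Int × Int) (x : Int × Int) =>
            (if x.2 > mm.1 then x.2 else mm.1, if x.2 < mm.2 then x.2 else mm.2))
          _ (by norm_num)]
    simp only [Int.toNat_one, List.drop_one, List.tail_cons]
    rw [← List.foldl_map (f := fun (x : Int × Int) => x.2)
          (g := fun (mm : Int × Int) (y : Int) =>
            (if y > mm.1 then y else mm.1, if y < mm.2 then y else mm.2)) (l := ls) (init := (p.2, p.2)),
        ← List.foldl_map (f := fun (x : Int × Int) => x.2)
          (g := fun (mm : Int × Int) (y : Int) =>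
            (if y > mm.1 then y else mm.1, if y < mm.2 then y else mm.2)) (l := right.tail),
        ← List.foldl_append, pairFold_split]
    -- the candidate y-list of B
    set ys := p.2 :: (List.map (fun q => q.2) ls ++ List.map (fun q => q.2) right.tail) with hys
    obtain ⟨hhead, hlast⟩ := sorted_head_getLast ys (by simp [hys])
    rw [List.singleton_append, List.cons_append, ← hys]
    rw [show PySem.List.pyGet? (PySem.List.sorted ys (fun y => y) false) (-1)
          = (PySem.List.sorted ys (fun y => y) false).getLast? from PySem.List.pyGet?_neg_one _]
    rw [show PySem.List.pyGet? (PySem.List.sorted ys (fun y => y) false) 0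
          = (PySem.List.sorted ys (fun y => y) false).head? by
            match hm : PySem.List.sorted ys (fun y => y) false with
            | [] => rfl
            | a :: t => simp [PySem.List.pyGet?, PySem.List.pyIdx?]]
    rw [hlast, hhead,
        max?_cons_foldl p.2 (List.map (fun q => q.2) ls ++ List.map (fun q => q.2) right.tail),
        min?_cons_foldl p.2 (List.map (fun q => q.2) ls ++ List.map (fun q => q.2) right.tail)]
    rfl
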